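-- pv_equiv track=rewrite | github.com/builder-hg/algorithm | baekjoon/20033.py | check
-- ===== SOURCE A (Python) =====
-- def check(mid, arr):
--     cnt = 0
--
--     for i in range(len(arr)):
--         val = arr[i]
--         if val >= mid:
--             cnt += 1
--         else:
--             cnt = 0
--         if cnt >= mid:
--             return True
--
--     return False
-- ===== SOURCE B (Python) =====
-- def check(mid, arr):
--     if not arr:
--         return False
--     seps = [i for i, v in enumerate(arr) if v < mid]
--     bounds = [-1] + seps + [len(arr)]
--     max_run = max(b - a - 1 for a, b in zip(bounds, bounds[1:]))
--     return max_run >= mid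
-- ===== Notes on version B (the rewrite author's own statement) =====
-- stated objective: alternative
-- what changed: Replaces A's early-returning incremental run counter with a separator-position formulation: collect the indices of elements below mid, bracket them with -1 and len(arr), take the maximum gap between consecutive separators as the longest qualifying run, and compare it to mid once at the end.
import Mathlib
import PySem

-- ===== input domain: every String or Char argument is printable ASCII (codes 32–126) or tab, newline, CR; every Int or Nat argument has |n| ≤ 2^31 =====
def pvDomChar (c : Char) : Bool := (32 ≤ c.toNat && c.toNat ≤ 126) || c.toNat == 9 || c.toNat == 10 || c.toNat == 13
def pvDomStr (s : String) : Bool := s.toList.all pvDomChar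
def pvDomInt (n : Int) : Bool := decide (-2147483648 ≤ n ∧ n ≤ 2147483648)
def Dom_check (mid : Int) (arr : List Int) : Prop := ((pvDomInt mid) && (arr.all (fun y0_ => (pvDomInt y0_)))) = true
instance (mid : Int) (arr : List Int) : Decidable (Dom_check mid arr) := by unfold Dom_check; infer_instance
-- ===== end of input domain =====

-- B replaces A's early-returning run counter with a separator-index formulation
-- (collect indices of elements < mid, take the max gap between consecutive
-- separators, compare once); same O(n) cost, alternative algorithm.

-- ===== PORT A =====
-- the for-loop over arr with the running counter cnt (early return True)
def checkLoop (mid : Int) : List Int → Int → Bool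
  | [], _ => false
  | v :: rest, cnt =>
    let cnt' := if v ≥ mid then cnt + 1 else 0
    if cnt' ≥ mid then true else checkLoop mid rest cnt'

def check (mid : Int) (arr : List Int) : Bool :=
  checkLoop mid arr 0

-- ===== PORT B =====
-- Python's max over a list (applied only to nonempty lists in check_alt)
def pvMaxOf : List Int → Int
  | [] => 0
  | g :: gs => gs.foldl max g

def check_alt (mid : Int) (arr : List Int) : Bool :=
  if arr = [] then false
  else
    -- seps = [i for i, v in enumerate(arr) if v < mid]
    let seps : List Int :=
      (PySem.List.enumerate arr).filterMap (fun p => if p.2 < mid then some p.1 else none)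
    -- bounds = [-1] + seps + [len(arr)]
    let bounds : List Int := [-1] ++ seps ++ [(arr.length : Int)]
    -- max_run = max(b - a - 1 for a, b in zip(bounds, bounds[1:]))
    -- (bounds[1:] = bounds.tail; max over the nonempty gap list = fold of max)
    let max_run : Int := pvMaxOf ((bounds.zip bounds.tail).map (fun p => p.2 - p.1 - 1))
    decide (max_run ≥ mid)

-- ===== PRECONDITION & SPEC =====
def Spec_check (mid : Int) (arr : List Int) (out : Bool) : Prop := out = check_alt mid arr
instance (mid : Int) (arr : List Int) (out : Bool) : Decidable (Spec_check mid arr out) := by unfold Spec_check; infer_instance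

-- ===== CLAIM (what is proved, stated in full; the proofs are below) =====
def Claim_equal_check : Prop := ∀ (mid : Int) (arr : List Int), Dom_check mid arr → Spec_check mid arr (check mid arr)

-- ===== LEMMAS AND PROOFS =====

-- F mid arr = length of the initial run of elements ≥ mid
def F (mid : Int) : List Int → Int
  | [] => 0
  | v :: t => if v ≥ mid then 1 + F mid t else 0

-- Lr mid arr = maximum over all suffixes of the initial-run length = longest run
def Lr (mid : Int) : List Int → Int
  | [] => 0
  | v :: t => max (F mid (v :: t)) (Lr mid t)

-- S mid k arr = indices (offset k) of elements < mid
def S (mid : Int) (k : Int) : List Int → List Int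
  | [] => []
  | v :: t => if v < mid then k :: S mid (k + 1) t else S mid (k + 1) t

-- M mid c arr = max run length, run of length c already open before arr
def M (mid : Int) (c : Int) : List Int → Int
  | [] => c
  | v :: t => if v < mid then max c (M mid 0 t) else M mid (c + 1) t

-- gmax p l e = max over consecutive gaps (minus 1) of the list p :: l ++ [e]
def gmax (p : Int) : List Int → Int → Int
  | [], e => e - p - 1
  | x :: l, e => max (x - p - 1) (gmax x l e)

theorem F_nonneg (mid : Int) (arr : List Int) : 0 ≤ F mid arr := by
  induction arr with
  | nil => simp [F]
  | cons v t ih => simp only [F]; split <;> omega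

theorem Lr_nonneg (mid : Int) (arr : List Int) : 0 ≤ Lr mid arr := by
  induction arr with
  | nil => simp [Lr]
  | cons v t ih => simp only [Lr]; omega

theorem F_le_Lr (mid : Int) (arr : List Int) : F mid arr ≤ Lr mid arr := by
  cases arr with
  | nil => simp [F, Lr]
  | cons v t => simp only [Lr]; exact le_max_left _ _

-- A's loop decided: the run containing cnt can reach mid, or some later run can
theorem checkLoop_eq (mid : Int) (arr : List Int) :
    ∀ cnt : Int, 0 ≤ cnt → cnt < mid →
      checkLoop mid arr cnt = decide (mid ≤ cnt + F mid arr ∨ mid ≤ Lr mid arr) := by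
  induction arr with
  | nil =>
    intro cnt h0 h1
    simp only [checkLoop, F, Lr]
    rw [eq_comm, decide_eq_false_iff_not]
    omega
  | cons v t ih =>
    intro cnt h0 h1
    simp only [checkLoop]
    by_cases hv : v ≥ mid
    · simp only [if_pos hv]
      by_cases hc : cnt + 1 ≥ mid
      · have hF := F_nonneg mid t
        have : mid ≤ cnt + F mid (v :: t) ∨ mid ≤ Lr mid (v :: t) := by
          left; simp only [F, if_pos hv]; omega
        simp [hc, this]
      · rw [if_neg hc, ih (cnt + 1) (by omega) (by omega)]
        have hF := F_nonneg mid t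
        have hL := Lr_nonneg mid t
        rw [decide_eq_decide]
        simp only [F, Lr, if_pos hv, le_max_iff]
        constructor <;> (intro h; rcases h with h | h) <;> omega
    · simp only [if_neg hv]
      have hm : ¬ (0 ≥ mid) := by omega
      rw [if_neg hm, ih 0 le_rfl (by omega)]
      have hFL := F_le_Lr mid t
      rw [decide_eq_decide]
      simp only [F, Lr, if_neg hv, le_max_iff]
      constructor <;> (intro h; rcases h with h | h) <;> omega

-- A characterised by the longest-run function
theorem check_eq_Lr (mid : Int) (arr : List Int) :
    check mid arr = decide (arr ≠ [] ∧ mid ≤ Lr mid arr) := by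
  by_cases hm : mid ≤ 0
  · cases arr with
    | nil => simp [check, checkLoop]
    | cons v t =>
      have hL := Lr_nonneg mid (v :: t)
      have h1 : (if v ≥ mid then (0:Int) + 1 else 0) ≥ mid := by split <;> omega
      simp only [check, checkLoop, if_pos h1]
      have : (v :: t) ≠ ([] : List Int) ∧ mid ≤ Lr mid (v :: t) := ⟨by simp, by omega⟩
      simp [this]
  · rw [check, checkLoop_eq mid arr 0 le_rfl (by omega)]
    have hFL := F_le_Lr mid arr
    rw [decide_eq_decide]
    cases arr with
    | nil => simp only [F, Lr]; constructor <;> (intro h) <;> [omega; exact absurd rfl h.1]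
    | cons v t =>
      constructor
      · intro h; exact ⟨by simp, by omega⟩
      · intro h; omega

-- the port's enumerate/filterMap comprehension is S
theorem seps_eq (mid : Int) (arr : List Int) : ∀ k : Int,
    (PySem.List.enumerate arr k).filterMap (fun p => if p.2 < mid then some p.1 else none)
      = S mid k arr := by
  induction arr with
  | nil => intro k; simp [PySem.List.enumerate_nil, S]
  | cons v t ih =>
    intro k
    rw [PySem.List.enumerate_cons]
    simp only [List.filterMap_cons, S]
    by_cases hv : v < mid
    · simp only [if_pos hv, ih (k + 1)]
    · simp only [if_neg hv, ih (k + 1)]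

-- gaps between separators compute the accumulator recursion M
theorem gmax_eq_M (mid : Int) (arr : List Int) : ∀ k p : Int, p + 1 ≤ k →
    gmax p (S mid k arr) (k + (arr.length : Int)) = M mid (k - p - 1) arr := by
  induction arr with
  | nil => intro k p _; simp [S, gmax, M]
  | cons v t ih =>
    intro k p hpk
    have hlen : k + ((v :: t).length : Int) = (k + 1) + (t.length : Int) := by
      simp only [List.length_cons]; push_cast; ring
    by_cases hv : v < mid
    · simp only [S, if_pos hv, gmax, hlen, M]
      rw [ih (k + 1) k (by omega)]
      have : k + 1 - k - 1 = (0 : Int) := by ring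
      rw [this]
    · simp only [S, if_neg hv, hlen, M]
      rw [ih (k + 1) p (by omega)]
      have : k + 1 - p - 1 = (k - p - 1) + 1 := by ring
      rw [this]

-- M with a nonnegative open run equals the F/Lr combination
theorem M_eq (mid : Int) (arr : List Int) : ∀ c : Int, 0 ≤ c →
    M mid c arr = max (c + F mid arr) (Lr mid arr) := by
  induction arr with
  | nil => intro c hc; simp only [M, F, Lr]; omega
  | cons v t ih =>
    intro c hc
    have hF := F_nonneg mid t
    have hL := Lr_nonneg mid t
    have hFL := F_le_Lr mid t
    by_cases hv : v < mid
    · simp only [M, if_pos hv, F, Lr, if_neg (by omega : ¬ v ≥ mid)]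
      rw [ih 0 le_rfl]
      omega
    · simp only [M, if_neg hv, F, Lr, if_pos (by omega : v ≥ mid)]
      rw [ih (c + 1) (by omega)]
      omega

theorem foldl_max_max (l : List Int) : ∀ a b : Int,
    l.foldl max (max a b) = max a (l.foldl max b) := by
  induction l with
  | nil => intro a b; simp
  | cons c l ih =>
    intro a b
    simp only [List.foldl_cons, max_assoc]
    exact ih a (max b c)

-- the port's zip/map/fold gap computation is gmax
theorem zipgaps (l : List Int) : ∀ p e : Int,
    pvMaxOf (((p :: (l ++ [e])).zip ((p :: (l ++ [e])).tail)).map (fun q => q.2 - q.1 - 1))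
      = gmax p l e := by
  induction l with
  | nil => intro p e; simp [gmax, pvMaxOf]
  | cons x l ih =>
    intro p e
    simp only [List.cons_append, List.tail_cons, List.zip_cons_cons, List.map_cons]
    have hne : ∃ g gs, ((x :: (l ++ [e])).zip (l ++ [e])).map (fun q => q.2 - q.1 - 1) = g :: gs := by
      cases l with
      | nil => exact ⟨_, _, rfl⟩
      | cons y l' => exact ⟨_, _, rfl⟩
    obtain ⟨g, gs, hg⟩ := hne
    have hprev := ih x e
    simp only [List.tail_cons] at hprev
    rw [hg] at hprev ⊢
    have hprev' : gs.foldl max g = gmax x l e := hprev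
    simp only [pvMaxOf, List.foldl_cons]
    rw [foldl_max_max gs (x - p - 1) g, hprev', gmax]

-- B characterised by the same longest-run function
theorem check_alt_eq_Lr (mid : Int) (arr : List Int) :
    check_alt mid arr = decide (arr ≠ [] ∧ mid ≤ Lr mid arr) := by
  by_cases h : arr = []
  · subst h; simp [check_alt]
  · simp only [check_alt, if_neg h]
    rw [seps_eq mid arr 0]
    have hz := zipgaps (S mid 0 arr) (-1) ((arr.length : Int))
    -- [-1] ++ l is definitionally -1 :: l
    have hz' : pvMaxOf (List.map (fun p => p.2 - p.1 - 1)
        (([-1] ++ S mid 0 arr ++ [(arr.length : Int)]).zip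
          ([-1] ++ S mid 0 arr ++ [(arr.length : Int)]).tail))
        = gmax (-1) (S mid 0 arr) (arr.length : Int) := hz
    simp only [hz']
    simp only [decide_eq_decide]
    have hg := gmax_eq_M mid arr 0 (-1) (by omega)
    rw [zero_add] at hg
    have h01 : (0 : Int) - (-1) - 1 = 0 := by ring
    rw [h01] at hg
    rw [hg, M_eq mid arr 0 le_rfl]
    have hFL := F_le_Lr mid arr
    constructor
    · intro hle; exact ⟨h, by omega⟩
    · intro ⟨_, hle⟩; omega

-- ===== VERDICT (by name: the statement is the Claim_ definition above) =====
theorem check_spec : Claim_equal_check := by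
  intro mid arr _
  unfold Spec_check
  rw [check_eq_Lr, check_alt_eq_Lr]
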